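-- pv_equiv track=rewrite | github.com/rsun17/Government-Procurement-Contract | Code/01-generate new variable.py | keep2
-- ===== SOURCE A (Python) =====
-- def keep2(text1):
--     """sig: str->list
--     remove all numbers and symbol - from the string
--     and then change string into lists with different organizations"""
--     for letter in text1:
--         if letter.isdigit():
--             text1=text1.replace(letter," ")
--         elif letter=='-':
--             text1=text1.replace(letter," ") #remove all numbers and symbol -
--
--     text1=text1.split(" ")
--     for word in text1:
--         for i in range(0, len(word)):
--             if word[i]==" ":
--                 word=word.replace(word[i],"") # change str into list and removes all empty spaces in each entry of the list
--
--     while '' in text1: #removes all empty entries in the list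
--         text1.remove('')
--
--     return text1
-- ===== SOURCE B (Python) =====
-- def keep2(text1):
--     """sig: str->list
--     Single-pass tokenizer: digits, '-' and ' ' are separators; everything
--     else is collected into the current token."""
--     result = []
--     buf = []
--     for c in text1:
--         if c.isdigit() or c == '-' or c == ' ':
--             if buf:
--                 result.append(''.join(buf))
--                 buf = []
--         else:
--             buf.append(c)
--     if buf:
--         result.append(''.join(buf))
--     return result
-- ===== Notes on version B (the rewrite author's own statement) =====
-- stated objective: simpler
-- what changed: Replaced the repeated whole-string replace() passes, split, dead inner cleanup loop and while-remove loop with a single character-by-character tokenizer that emits tokens directly.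
import Mathlib
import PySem

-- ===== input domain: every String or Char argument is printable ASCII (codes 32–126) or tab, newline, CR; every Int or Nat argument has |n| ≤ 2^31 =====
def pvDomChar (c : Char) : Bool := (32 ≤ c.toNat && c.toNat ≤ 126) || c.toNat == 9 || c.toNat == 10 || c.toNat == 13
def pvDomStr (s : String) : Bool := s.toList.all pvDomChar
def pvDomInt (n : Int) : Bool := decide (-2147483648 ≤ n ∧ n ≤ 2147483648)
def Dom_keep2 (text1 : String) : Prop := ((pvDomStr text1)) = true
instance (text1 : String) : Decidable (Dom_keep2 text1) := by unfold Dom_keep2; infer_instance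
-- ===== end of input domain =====

-- B replaces A's repeated whole-string replace passes + split + while-remove loop with a
-- single character-by-character tokenizer (objective: simpler).

-- ===== PORT A =====
-- while '' in l: l.remove('')  — fuel = the list's length (each iteration removes one element)
def pyWhileRemoveEmpty : Nat → List String → List String
  | 0, l => l
  | Nat.succ n, l =>
      if "" ∈ l then
        match PySem.List.remove? l "" with
        | some l' => pyWhileRemoveEmpty n l'
        | none => l
      else l

def keep2 (text1 : String) : List String :=
  -- for letter in text1: replace every digit / '-' by a space (replace replaces ALL occurrences)
  let t1 := text1.toList.foldl (fun s letter =>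
      if PySem.Str.strIsdigit (String.ofList [letter]) then PySem.Str.replace s (String.ofList [letter]) " "
      else if letter == '-' then PySem.Str.replace s (String.ofList [letter]) " " else s) text1
  -- text1 = text1.split(" ")  (sep " " ≠ "", so split? is always some)
  let parts := (PySem.Str.split? t1 " ").getD []
  -- for word in parts: the inner loop rebinds only the local 'word'; the list is unchanged (result discarded, as in Python)
  let _ := parts.map (fun word =>
      (PySem.List.pyRange 0 (PySem.Str.len word) 1).foldl (fun w i =>
        match PySem.Str.pyGet? w i with
        | some ch => if ch == ' ' then PySem.Str.replace w (String.ofList [ch]) "" else w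
        | none => w) word)   -- pyGet? is none only out of range, unreachable here (i < len of the unchanged word)
  -- while '' in parts: parts.remove('')
  pyWhileRemoveEmpty parts.length parts

-- ===== PORT B =====
def keep2_alt (text1 : String) : List String :=
  let st := text1.toList.foldl (fun (st : List String × List Char) c =>
      if PySem.Chars.isdigit c || c == '-' || c == ' ' then
        (if st.2.isEmpty then st.1 else st.1 ++ [String.ofList st.2], [])
      else (st.1, st.2 ++ [c])) ([], [])
  if st.2.isEmpty then st.1 else st.1 ++ [String.ofList st.2]

-- ===== PRECONDITION & SPEC =====
def Spec_keep2 (text1 : String) (out : List String) : Prop := out = keep2_alt text1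
instance (text1 : String) (out : List String) : Decidable (Spec_keep2 text1 out) := by unfold Spec_keep2; infer_instance

-- ===== CLAIM (what is proved, stated in full; the proofs are below) =====
def Claim_equal_keep2 : Prop := ∀ (text1 : String), Dom_keep2 text1 → Spec_keep2 text1 (keep2 text1)

-- ===== LEMMAS AND PROOFS =====

-- a character A's first pass turns into a space: digit or '-'
def pvSep0 (c : Char) : Bool := PySem.Chars.isdigit c || c == '-'
def pvSubst (c : Char) : Char := if pvSep0 c then ' ' else c

lemma pvSep0_space : pvSep0 ' ' = false := by decide

-- replace with single-char old/new is a pointwise substitution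
lemma replace_go_single (a b : Char) :
    ∀ (l : List Char) (fuel : Nat) (acc : List Char), l.length ≤ fuel →
      PySem.Chars.replace.go [a] [b] fuel l acc
        = acc.reverse ++ l.map (fun c => if c = a then b else c) := by
  intro l
  induction l with
  | nil =>
      intro fuel acc _
      cases fuel <;> simp [PySem.Chars.replace.go]
  | cons c t ih =>
      intro fuel acc h
      cases fuel with
      | zero => simp at h
      | succ f =>
        by_cases hca : c = a
        · subst hca
          simp only [PySem.Chars.replace.go, List.isPrefixOf, beq_self_eq_true, Bool.true_and,
            if_pos, List.length_cons]
          rw [show List.drop ([].length + 1) (c :: t) = t from by simp,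
            ih f _ (Nat.le_of_succ_le_succ h)]
          simp
        · have hne : (a == c) = false := by simp; exact fun h' => hca h'.symm
          simp only [PySem.Chars.replace.go, List.isPrefixOf, hne, Bool.false_and,
            Bool.false_eq_true, if_false]
          rw [ih f _ (Nat.le_of_succ_le_succ h)]
          simp [hca]

lemma replace_single (a b : Char) (s : List Char) :
    PySem.Chars.replace s [a] [b] = s.map (fun c => if c = a then b else c) := by
  simpa [PySem.Chars.replace] using replace_go_single a b s s.length [] (le_refl _)

-- A's first for-loop, moved from String state to List Char state
lemma strfold_toList (letters : List Char) :
    ∀ s : String,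
      (letters.foldl (fun s letter =>
        if PySem.Str.strIsdigit (String.ofList [letter]) then PySem.Str.replace s (String.ofList [letter]) " "
        else if letter == '-' then PySem.Str.replace s (String.ofList [letter]) " " else s) s).toList
      = letters.foldl (fun cs letter =>
          if pvSep0 letter then PySem.Chars.replace cs [letter] [' '] else cs) s.toList := by
  induction letters with
  | nil => intro s; rfl
  | cons l rest ih =>
      intro s
      simp only [List.foldl_cons]
      rw [ih]
      congr 1
      by_cases hd : PySem.Chars.isdigit l = true
      · have : PySem.Str.strIsdigit (String.ofList [l]) = true := by
          simp [PySem.Str.strIsdigit_eq, String.toList_ofList, PySem.Chars.strIsdigit, hd]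
        rw [if_pos this, if_pos (by simp [pvSep0, hd])]
        simp [PySem.Str.toList_replace, String.toList_ofList]
      · have hnd : PySem.Str.strIsdigit (String.ofList [l]) = false := by
          simp [PySem.Str.strIsdigit_eq, String.toList_ofList, PySem.Chars.strIsdigit, hd]
        rw [if_neg (by simp [PySem.Str.strIsdigit_eq, String.toList_ofList, PySem.Chars.strIsdigit, hd])]
        by_cases hm : l = '-'
        · rw [if_pos (by simp [hm]), if_pos (by simp [pvSep0, hm])]
          simp [PySem.Str.toList_replace, String.toList_ofList]
        · rw [if_neg (by simp [hm]), if_neg (by simp [pvSep0, hd, hm])]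

-- A's first for-loop computes the pointwise substitution
lemma foldA_eq_map (letters : List Char) :
    ∀ s : List Char,
      letters.foldl (fun cs letter =>
        if pvSep0 letter then PySem.Chars.replace cs [letter] [' '] else cs) s
      = s.map (fun c => if pvSep0 c ∧ c ∈ letters then ' ' else c) := by
  induction letters with
  | nil => intro s; simp
  | cons l rest ih =>
      intro s
      simp only [List.foldl_cons]
      by_cases hl : pvSep0 l = true
      · rw [if_pos hl, replace_single, ih, List.map_map]
        apply List.map_congr_left
        intro c _
        by_cases hcl : c = l
        · subst hcl
          have h1 : pvSep0 ' ' = false := pvSep0_space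
          simp [Function.comp, hl, h1]
        · by_cases hc : pvSep0 c = true <;> simp [Function.comp, hcl, hc]
      · rw [if_neg hl, ih]
        apply List.map_congr_left
        intro c _
        by_cases hc : pvSep0 c = true
        · have : c ≠ l := fun h => hl (h ▸ hc)
          simp [hc, this]
        · simp [hc]

-- the tokenizer, proof-side, on char lists
def pvTok : List Char → List Char → List (List Char)
  | [], buf => if buf.isEmpty then [] else [buf]
  | c :: cs, buf =>
      if c = ' ' then (if buf.isEmpty then pvTok cs [] else buf :: pvTok cs [])
      else pvTok cs (buf ++ [c])

-- B's fold (finished by flushing the buffer) equals pvTok over the substituted characters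
def pvFinish (st : List String × List Char) : List String :=
  if st.2.isEmpty then st.1 else st.1 ++ [String.ofList st.2]

lemma foldB_eq_tok (cs : List Char) :
    ∀ (acc : List String) (buf : List Char),
      pvFinish (cs.foldl (fun (st : List String × List Char) c =>
          if PySem.Chars.isdigit c || c == '-' || c == ' ' then
            (if st.2.isEmpty then st.1 else st.1 ++ [String.ofList st.2], [])
          else (st.1, st.2 ++ [c])) (acc, buf))
      = acc ++ (pvTok (cs.map pvSubst) buf).map String.ofList := by
  induction cs with
  | nil =>
      intro acc buf
      by_cases hb : buf.isEmpty <;> simp [pvFinish, pvTok, hb]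
  | cons c cs ih =>
      intro acc buf
      simp only [List.foldl_cons, List.map_cons]
      by_cases hsep : (PySem.Chars.isdigit c || c == '-' || c == ' ') = true
      · have hsub : pvSubst c = ' ' := by
          simp only [Bool.or_eq_true, beq_iff_eq] at hsep
          rcases hsep with (h | h) | h
          · simp [pvSubst, pvSep0, h]
          · simp [pvSubst, pvSep0, h]
          · by_cases h0 : pvSep0 c = true <;> simp [pvSubst, h]
        rw [if_pos hsep, hsub]
        by_cases hb : buf.isEmpty
        · rw [if_pos hb, ih]
          simp [pvTok, List.isEmpty_iff.mp hb]
        · rw [if_neg hb, ih]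
          simp [pvTok, hb]
      · have hsub : pvSubst c = c := by
          simp only [Bool.or_eq_true, beq_iff_eq, not_or] at hsep
          simp [pvSubst, pvSep0, hsep.1.1, hsep.1.2]
        have hcs : ¬ c = ' ' := by
          simp only [Bool.or_eq_true, beq_iff_eq, not_or] at hsep
          exact hsep.2
        rw [if_neg hsep, hsub, ih]
        simp [pvTok, hcs]

-- splitOn by a single space, with empties dropped, is pvTok
lemma splitOn_go_tok :
    ∀ (cs : List Char) (fuel : Nat) (cur : List Char) (acc : List (List Char)),
      cs.length < fuel →
      (PySem.Chars.splitOn.go [' '] fuel cs cur acc).filter (fun w => !w.isEmpty)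
        = acc.reverse.filter (fun w => !w.isEmpty) ++ pvTok cs cur.reverse := by
  intro cs
  induction cs with
  | nil =>
      intro fuel cur acc h
      cases fuel with
      | zero => omega
      | succ f =>
        by_cases hc : cur.reverse.isEmpty <;>
          simp [PySem.Chars.splitOn.go, pvTok, hc, List.filter_append]
  | cons c cs ih =>
      intro fuel cur acc h
      cases fuel with
      | zero => omega
      | succ f =>
        by_cases hsp : c = ' '
        · subst hsp
          simp only [PySem.Chars.splitOn.go, List.isPrefixOf, beq_self_eq_true, Bool.true_and,
            if_pos]
          rw [show List.drop [' '].length (' ' :: cs) = cs from by simp,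
            ih f [] _ (by simpa using Nat.lt_of_succ_lt_succ h)]
          by_cases hc : cur.reverse.isEmpty <;>
            simp [pvTok, hc, List.filter_append]
        · have hne : (' ' == c) = false := by simp; exact fun h' => hsp h'.symm
          simp only [PySem.Chars.splitOn.go, List.isPrefixOf, hne, Bool.false_and,
            Bool.false_eq_true, if_false]
          rw [ih f (c :: cur) _ (Nat.lt_of_succ_lt_succ h)]
          simp [pvTok, hsp]

-- filtering out "" commutes with erasing one ""
lemma filter_erase_empty (l : List String) :
    (l.erase "").filter (fun w => w ≠ "") = l.filter (fun w => w ≠ "") := by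
  induction l with
  | nil => simp
  | cons x xs ih =>
      by_cases hx : x = ""
      · subst hx; simp
      · rw [List.erase_cons, if_neg (by simp [hx])]
        simp only [List.filter_cons]
        rw [ih]

-- the while-remove loop is a filter, given enough fuel
lemma whileRemove_eq_filter :
    ∀ (n : Nat) (l : List String), l.count "" ≤ n →
      pyWhileRemoveEmpty n l = l.filter (fun w => w ≠ "") := by
  intro n
  induction n with
  | zero =>
      intro l h
      have hm : "" ∉ l := by
        intro hm; have := List.count_pos_iff.mpr hm; omega
      rw [pyWhileRemoveEmpty]
      symm; rw [List.filter_eq_self]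
      intro a ha
      simp only [ne_eq, decide_eq_true_eq]
      exact fun he => hm (he ▸ ha)
  | succ n ih =>
      intro l h
      by_cases hm : "" ∈ l
      · rw [pyWhileRemoveEmpty, if_pos hm, PySem.List.remove?_eq_some_erase l "" hm]
        show pyWhileRemoveEmpty n (l.erase "") = _
        rw [ih (l.erase "") (by rw [List.count_erase_self]; omega), filter_erase_empty]
      · rw [pyWhileRemoveEmpty, if_neg hm]
        symm; rw [List.filter_eq_self]
        intro a ha
        simp only [ne_eq, decide_eq_true_eq]
        exact fun he => hm (he ▸ ha)

-- ===== VERDICT (by name: the statement is the Claim_ definition above) =====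
theorem keep2_spec : Claim_equal_keep2 := by
  intro text1 _
  unfold Spec_keep2
  -- step 1: the replace loop is a pointwise substitution
  have h1 : (text1.toList.foldl (fun s letter =>
      if PySem.Str.strIsdigit (String.ofList [letter]) then PySem.Str.replace s (String.ofList [letter]) " "
      else if letter == '-' then PySem.Str.replace s (String.ofList [letter]) " " else s) text1).toList
      = text1.toList.map pvSubst := by
    rw [strfold_toList, foldA_eq_map]
    apply List.map_congr_left
    intro c hc
    by_cases h : pvSep0 c = true <;> simp [pvSubst, h, hc]
  -- step 2: peel A's let-chain (the discarded middle loop vanishes), then split and drop empties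
  have hA : keep2 text1 = pyWhileRemoveEmpty
      ((PySem.Str.split? (text1.toList.foldl (fun s letter =>
        if PySem.Str.strIsdigit (String.ofList [letter]) then PySem.Str.replace s (String.ofList [letter]) " "
        else if letter == '-' then PySem.Str.replace s (String.ofList [letter]) " " else s) text1) " ").getD []).length
      ((PySem.Str.split? (text1.toList.foldl (fun s letter =>
        if PySem.Str.strIsdigit (String.ofList [letter]) then PySem.Str.replace s (String.ofList [letter]) " "
        else if letter == '-' then PySem.Str.replace s (String.ofList [letter]) " " else s) text1) " ").getD []) := rfl
  have hsplit : (PySem.Str.split? (text1.toList.foldl (fun s letter =>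
      if PySem.Str.strIsdigit (String.ofList [letter]) then PySem.Str.replace s (String.ofList [letter]) " "
      else if letter == '-' then PySem.Str.replace s (String.ofList [letter]) " " else s) text1) " ").getD []
      = (PySem.Chars.splitOn (text1.toList.map pvSubst) [' ']).map String.ofList := by
    simp only [PySem.Str.split?, PySem.Chars.split?]
    rw [show " ".toList = [' '] from by decide, h1]
    rfl
  rw [hA, hsplit, whileRemove_eq_filter _ _ (List.count_le_length ..)]
  -- step 3: filter over map ofList = map ofList over filter, then splitOn = pvTok = B's fold
  rw [List.filter_map]
  have hpred : ((fun w : String => decide (w ≠ "")) ∘ String.ofList)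
      = (fun w : List Char => !w.isEmpty) := by
    have hof : ∀ w : List Char, (String.ofList w = "") ↔ w = [] := by
      intro w
      constructor
      · intro h; have := congrArg String.toList h; simpa using this
      · rintro rfl; rfl
    funext w
    simp only [Function.comp, ne_eq, hof w, decide_not]
    cases w <;> simp
  rw [hpred]
  rw [PySem.Chars.splitOn, splitOn_go_tok _ _ _ _ (Nat.lt_succ_self _)]
  have hB : keep2_alt text1 = pvFinish (text1.toList.foldl (fun (st : List String × List Char) c =>
      if PySem.Chars.isdigit c || c == '-' || c == ' ' then
        (if st.2.isEmpty then st.1 else st.1 ++ [String.ofList st.2], [])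
      else (st.1, st.2 ++ [c])) ([], [])) := rfl
  rw [hB, foldB_eq_tok]
  simp
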